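-- pv_equiv track=rewrite | github.com/kecker26/my-repository | games/pacman-python/src/game.py | load_level
-- ===== SOURCE A (Python) =====
-- from typing import List, Tuple
--
-- def load_level(maze: List[str]):
--     """Parst das Spielfeld und liefert relevante Strukturen zurück.
--
--     Gibt ein Tupel zurück bestehend aus:
--
--     * walls – Menge von (x, y)‐Koordinaten, an denen sich Wände befinden
--     * pellets – Menge von (x, y)‐Koordinaten, an denen sich Pellets befinden
--     * player_start – Startkoordinaten für Pacman
--     * ghost_starts – Liste mit Startkoordinaten für Geister
--     """
--     walls: set[Tuple[int, int]] = set()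
--     pellets: set[Tuple[int, int]] = set()
--     ghost_starts: List[Tuple[int, int]] = []
--     player_start: Tuple[int, int] | None = None
--     for y, row in enumerate(maze):
--         for x, char in enumerate(row):
--             if char == '#':
--                 walls.add((x, y))
--             elif char == '.':
--                 pellets.add((x, y))
--             elif char == 'P':
--                 player_start = (x, y)
--                 pellets.add((x, y))
--             elif char == 'G':
--                 ghost_starts.append((x, y))
--                 pellets.add((x, y))
--             else:
--                 # Leerzeichen werden auch als Pellet behandelt
--                 pellets.add((x, y))
--     if player_start is None:
--         raise ValueError("Level enthält keine Startposition für den Spieler 'P'")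
--     return walls, pellets, player_start, ghost_starts
-- ===== SOURCE B (Python) =====
-- from typing import List, Tuple
--
-- def load_level(maze: List[str]):
--     """Separate single-purpose passes instead of one interleaved scan:
--     pellets are exactly the non-wall cells."""
--     walls = {(x, y) for y, row in enumerate(maze) for x, c in enumerate(row) if c == '#'}
--     pellets = {(x, y) for y, row in enumerate(maze) for x, c in enumerate(row) if c != '#'}
--     ghost_starts = [(x, y) for y, row in enumerate(maze) for x, c in enumerate(row) if c == 'G']
--     players = [(x, y) for y, row in enumerate(maze) for x, c in enumerate(row) if c == 'P']
--     if not players: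
--         raise ValueError("Level enthält keine Startposition für den Spieler 'P'")
--     return walls, pellets, players[-1], ghost_starts
-- ===== Notes on version B (the rewrite author's own statement) =====
-- stated objective: simpler
-- what changed: A's single interleaved scan maintaining four structures at once is replaced by four independent single-purpose comprehension passes, using the observation that pellets are exactly the non-'#' cells and player_start is the last 'P' cell.
import Mathlib
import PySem

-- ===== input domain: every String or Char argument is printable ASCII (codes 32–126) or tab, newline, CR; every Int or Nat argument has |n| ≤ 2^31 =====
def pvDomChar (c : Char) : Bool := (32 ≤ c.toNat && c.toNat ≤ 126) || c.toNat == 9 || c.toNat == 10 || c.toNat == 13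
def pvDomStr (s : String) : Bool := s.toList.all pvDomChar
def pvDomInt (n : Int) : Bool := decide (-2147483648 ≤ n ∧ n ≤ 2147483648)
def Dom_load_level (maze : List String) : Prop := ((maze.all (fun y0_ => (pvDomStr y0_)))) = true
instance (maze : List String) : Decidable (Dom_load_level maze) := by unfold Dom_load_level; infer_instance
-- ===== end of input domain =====

-- B replaces A's single interleaved scan by four independent single-purpose passes
-- (pellets = exactly the non-'#' cells, player = last 'P' cell); objective: simpler.

-- ===== PORT A =====
-- A: one loop over enumerate(maze) with an inner loop over enumerate(row), maintaining
-- (walls, pellets, player_start, ghost_starts) simultaneously; on player_start = None A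
-- raises ValueError (excluded by Pre_) — the port returns (0, 0) there.
def load_level (maze : List String) : (List (Int × Int)) × (List (Int × Int)) × (Int × Int) × (List (Int × Int)) :=
  let st : PySem.Set (Int × Int) × PySem.Set (Int × Int) × Option (Int × Int) × List (Int × Int) :=
    (PySem.List.enumerate maze 0).foldl (fun st yr =>
      (PySem.List.enumerate yr.2.toList 0).foldl (fun st xc =>
        if xc.2 = '#' then (PySem.Set.add st.1 (xc.1, yr.1), st.2.1, st.2.2.1, st.2.2.2)
        else if xc.2 = '.' then (st.1, PySem.Set.add st.2.1 (xc.1, yr.1), st.2.2.1, st.2.2.2)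
        else if xc.2 = 'P' then (st.1, PySem.Set.add st.2.1 (xc.1, yr.1), some (xc.1, yr.1), st.2.2.2)
        else if xc.2 = 'G' then (st.1, PySem.Set.add st.2.1 (xc.1, yr.1), st.2.2.1, st.2.2.2 ++ [(xc.1, yr.1)])
        else (st.1, PySem.Set.add st.2.1 (xc.1, yr.1), st.2.2.1, st.2.2.2)) st)
      ([], [], none, [])
  match st.2.2.1 with
  | some p => (st.1, st.2.1, p, st.2.2.2)
  | none => (st.1, st.2.1, (0, 0), st.2.2.2)  -- Python: raise ValueError (outside Pre_)

-- ===== PORT B =====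
-- the comprehension [(x,y) for y,row in enumerate(maze) for x,c in enumerate(row) if pred(c)]
def cellsIf (maze : List String) (pred : Char → Prop) [DecidablePred pred] : List (Int × Int) :=
  (PySem.List.enumerate maze 0).flatMap (fun yr =>
    (PySem.List.enumerate yr.2.toList 0).filterMap (fun xc =>
      if pred xc.2 then some (xc.1, yr.1) else none))

def load_level_alt (maze : List String) : (List (Int × Int)) × (List (Int × Int)) × (Int × Int) × (List (Int × Int)) :=
  let walls := PySem.Set.ofList (cellsIf maze (· = '#'))
  let pellets := PySem.Set.ofList (cellsIf maze (· ≠ '#'))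
  let ghost_starts := cellsIf maze (· = 'G')
  let players := cellsIf maze (· = 'P')
  (walls, pellets, (PySem.List.pyGet? players (-1)).getD (0, 0), ghost_starts)  -- players[-1]; Python: raise ValueError when players = [] (outside Pre_)

-- ===== PRECONDITION & SPEC =====
-- Pre_ excludes exactly the mazes with no 'P' cell, on which both Pythons raise ValueError.
def Pre_load_level (maze : List String) : Prop := (maze.any (fun row => row.toList.contains 'P')) = true
instance (maze : List String) : Decidable (Pre_load_level maze) := by unfold Pre_load_level; infer_instance
def pvWitness_load_level : List String := ["#.P", "G. "]

def Spec_load_level (maze : List String) (out : (List (Int × Int)) × (List (Int × Int)) × (Int × Int) × (List (Int × Int))) : Prop := out = load_level_alt maze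
instance (maze : List String) (out : (List (Int × Int)) × (List (Int × Int)) × (Int × Int) × (List (Int × Int))) : Decidable (Spec_load_level maze out) := by unfold Spec_load_level; infer_instance

-- ===== CLAIM (what is proved, stated in full; the proofs are below) =====
def Claim_equal_load_level : Prop := ∀ (maze : List String), Dom_load_level maze → Pre_load_level maze → Spec_load_level maze (load_level maze)

-- ===== LEMMAS AND PROOFS =====

-- the body of A's inner loop, as a step on flattened (x, y, c) cells
def stepA (st : PySem.Set (Int × Int) × PySem.Set (Int × Int) × Option (Int × Int) × List (Int × Int))
    (t : Int × Int × Char) :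
    PySem.Set (Int × Int) × PySem.Set (Int × Int) × Option (Int × Int) × List (Int × Int) :=
  if t.2.2 = '#' then (PySem.Set.add st.1 (t.1, t.2.1), st.2.1, st.2.2.1, st.2.2.2)
  else if t.2.2 = '.' then (st.1, PySem.Set.add st.2.1 (t.1, t.2.1), st.2.2.1, st.2.2.2)
  else if t.2.2 = 'P' then (st.1, PySem.Set.add st.2.1 (t.1, t.2.1), some (t.1, t.2.1), st.2.2.2)
  else if t.2.2 = 'G' then (st.1, PySem.Set.add st.2.1 (t.1, t.2.1), st.2.2.1, st.2.2.2 ++ [(t.1, t.2.1)])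
  else (st.1, PySem.Set.add st.2.1 (t.1, t.2.1), st.2.2.1, st.2.2.2)

-- the maze flattened to a row-major list of (x, y, char) cells
def cells (maze : List String) (s : Int) : List (Int × Int × Char) :=
  (PySem.List.enumerate maze s).flatMap (fun yr =>
    (PySem.List.enumerate yr.2.toList 0).map (fun xc => (xc.1, yr.1, xc.2)))

-- A's nested loop is a single fold of stepA over the flattened cells
lemma foldA_eq (maze : List String) (s : Int)
    (st : PySem.Set (Int × Int) × PySem.Set (Int × Int) × Option (Int × Int) × List (Int × Int)) :
    (PySem.List.enumerate maze s).foldl (fun st yr =>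
      (PySem.List.enumerate yr.2.toList 0).foldl (fun st xc =>
        if xc.2 = '#' then (PySem.Set.add st.1 (xc.1, yr.1), st.2.1, st.2.2.1, st.2.2.2)
        else if xc.2 = '.' then (st.1, PySem.Set.add st.2.1 (xc.1, yr.1), st.2.2.1, st.2.2.2)
        else if xc.2 = 'P' then (st.1, PySem.Set.add st.2.1 (xc.1, yr.1), some (xc.1, yr.1), st.2.2.2)
        else if xc.2 = 'G' then (st.1, PySem.Set.add st.2.1 (xc.1, yr.1), st.2.2.1, st.2.2.2 ++ [(xc.1, yr.1)])
        else (st.1, PySem.Set.add st.2.1 (xc.1, yr.1), st.2.2.1, st.2.2.2)) st) st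
    = (cells maze s).foldl stepA st := by
  induction maze generalizing s st with
  | nil => simp [cells, PySem.List.enumerate_nil]
  | cons r rs ih =>
    simp only [cells, PySem.List.enumerate_cons, List.flatMap_cons, List.foldl_cons,
      List.foldl_append, List.foldl_map]
    rw [ih]
    rfl

-- each of B's comprehension passes is a filterMap over the same flattened cells
lemma cellsIf_eq (maze : List String) (pred : Char → Prop) [DecidablePred pred] :
    cellsIf maze pred
    = (cells maze 0).filterMap (fun t => if pred t.2.2 then some (t.1, t.2.1) else none) := by
  simp [cellsIf, cells, List.filterMap_flatMap, List.filterMap_map]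

lemma getLast?_cons_or {a : Int × Int} {l : List (Int × Int)} :
    (a :: l).getLast? = l.getLast?.or (some a) := by
  cases l with
  | nil => simp
  | cons b t =>
    rw [List.getLast?_cons_cons]
    cases h : (b :: t).getLast? with
    | none => simp [List.getLast?_eq_none_iff] at h
    | some x => simp

-- the single interleaved fold computes each component independently
lemma foldA_components (cs : List (Int × Int × Char))
    (w p : PySem.Set (Int × Int)) (pl : Option (Int × Int)) (g : List (Int × Int)) :
    cs.foldl stepA (w, p, pl, g) =
      ((cs.filterMap (fun t => if t.2.2 = '#' then some (t.1, t.2.1) else none)).foldl PySem.Set.add w,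
       (cs.filterMap (fun t => if t.2.2 ≠ '#' then some (t.1, t.2.1) else none)).foldl PySem.Set.add p,
       (cs.filterMap (fun t => if t.2.2 = 'P' then some (t.1, t.2.1) else none)).getLast?.or pl,
       g ++ cs.filterMap (fun t => if t.2.2 = 'G' then some (t.1, t.2.1) else none)) := by
  induction cs generalizing w p pl g with
  | nil => simp
  | cons t cs ih =>
    by_cases h1 : t.2.2 = '#'
    · simp [stepA, h1, ih]
    · by_cases h2 : t.2.2 = '.'
      · simp [stepA, h2, ih]
      · by_cases h3 : t.2.2 = 'P'
        · simp [stepA, h3, ih, getLast?_cons_or]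
        · by_cases h4 : t.2.2 = 'G'
          · simp [stepA, h4, ih]
          · simp [stepA, h1, h2, h3, h4, ih]

lemma load_level_eq_alt (maze : List String) : load_level maze = load_level_alt maze := by
  unfold load_level load_level_alt
  rw [foldA_eq, foldA_components, cellsIf_eq, cellsIf_eq, cellsIf_eq, cellsIf_eq]
  simp only [PySem.Set.ofList_eq_foldl, PySem.List.pyGet?_neg_one, Option.or_none,
    List.nil_append, ne_eq]
  cases ((cells maze 0).filterMap
      (fun t => if t.2.2 = 'P' then some (t.1, t.2.1) else none)).getLast? <;> simp

-- ===== VERDICT (by name: the statement is the Claim_ definition above) =====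
theorem load_level_spec : Claim_equal_load_level := by
  intro maze _ _
  unfold Spec_load_level
  exact load_level_eq_alt maze
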